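-- pv_equiv track=rewrite | github.com/ZagkasD/Microprocessors-Homeworks | 1/1_2_MCOR4.py | calculate_switches
-- ===== SOURCE A (Python) =====
-- def calculate_switches(switchesNumber, vectorsNumber, workload, gateOutput):
--     for i in range(vectorsNumber):
--         # Checking the output of the OR gate for each input from the workload
--         newGateOutput = workload[i][0] or workload[i][1] or workload[i][2] or workload[i][3]
--
--         if (gateOutput == newGateOutput): # No switching
--             continue
--         else:   # Switching
--             gateOutput = newGateOutput
--             switchesNumber += 1
--     return switchesNumber
-- ===== SOURCE B (Python) =====
-- def calculate_switches(switchesNumber, vectorsNumber, workload, gateOutput):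
--     seq = [gateOutput] + [workload[i][0] or workload[i][1] or workload[i][2] or workload[i][3]
--                           for i in range(vectorsNumber)]
--
--     def trans(lo, hi):
--         # transitions inside seq[lo:hi], by divide and conquer:
--         # split at the midpoint, recurse on both halves, add the boundary pair
--         if hi - lo < 2:
--             return 0
--         mid = (lo + hi) // 2
--         return trans(lo, mid) + trans(mid, hi) + (1 if seq[mid - 1] != seq[mid] else 0)
--
--     return switchesNumber + trans(0, len(seq))
-- ===== Notes on version B (the rewrite author's own statement) =====
-- stated objective: alternative
-- what changed: Replaces A's fused left-to-right loop carrying a running gateOutput tracker with a divide-and-conquer recursion: build the sequence [gateOutput]+outputs once, then count transitions by recursively halving the index range and adding one boundary comparison per split.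
import Mathlib
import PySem

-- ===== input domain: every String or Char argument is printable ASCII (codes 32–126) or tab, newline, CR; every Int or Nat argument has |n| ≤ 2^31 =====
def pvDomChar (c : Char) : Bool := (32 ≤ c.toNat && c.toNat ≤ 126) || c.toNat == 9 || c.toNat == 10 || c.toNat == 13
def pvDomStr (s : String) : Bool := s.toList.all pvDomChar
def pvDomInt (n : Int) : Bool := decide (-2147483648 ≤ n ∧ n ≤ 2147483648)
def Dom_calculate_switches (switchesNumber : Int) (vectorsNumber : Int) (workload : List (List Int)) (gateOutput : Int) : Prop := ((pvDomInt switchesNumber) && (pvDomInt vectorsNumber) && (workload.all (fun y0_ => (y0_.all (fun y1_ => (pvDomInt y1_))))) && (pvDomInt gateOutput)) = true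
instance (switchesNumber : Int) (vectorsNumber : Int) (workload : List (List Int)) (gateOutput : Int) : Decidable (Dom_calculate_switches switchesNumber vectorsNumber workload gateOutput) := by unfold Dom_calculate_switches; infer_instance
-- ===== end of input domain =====

-- B replaces A's fused running-tracker loop with: build the output sequence once,
-- then count transitions by divide-and-conquer over the index range (alternative, same cost).

-- ===== PORT A =====
-- Python's short-circuiting `row[0] or row[1] or row[2] or row[3]` on ints:
-- returns the first nonzero operand, else the last one; `none` = IndexError.
def pvOr4 (row : List Int) : Option Int :=
  (PySem.List.pyGet? row 0).bind fun a =>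
    if a ≠ 0 then some a else
      (PySem.List.pyGet? row 1).bind fun b =>
        if b ≠ 0 then some b else
          (PySem.List.pyGet? row 2).bind fun c =>
            if c ≠ 0 then some c else
              PySem.List.pyGet? row 3

-- A: one pass, state = (switchesNumber, gateOutput); `none` = an IndexError occurred.
def calculate_switches (switchesNumber : Int) (vectorsNumber : Int) (workload : List (List Int)) (gateOutput : Int) : Int :=
  match (PySem.List.pyRange 0 vectorsNumber 1).foldl
      (fun (st : Option (Int × Int)) i =>
        st.bind fun p =>
          (PySem.List.pyGet? workload i).bind fun row =>
            (pvOr4 row).map fun newGateOutput =>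
              if p.2 == newGateOutput then p else (p.1 + 1, newGateOutput))
      (some (switchesNumber, gateOutput)) with
  | some p => p.1
  | none => 0  -- unreachable under Pre_ (Python raises IndexError)

-- ===== PORT B =====
-- Source B's inner `trans(lo, hi)`: transitions inside seq[lo:hi] by halving the range.
-- seq[mid-1] / seq[mid]: the calls made always keep these indices in range, so
-- List.getD's default 0 is never consulted (exact for those calls).
def pvTransDC (seq : List Int) (lo hi : Nat) : Int :=
  if hi - lo < 2 then 0
  else
    pvTransDC seq lo ((lo + hi) / 2) + pvTransDC seq ((lo + hi) / 2) hi +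
      (if seq.getD ((lo + hi) / 2 - 1) 0 ≠ seq.getD ((lo + hi) / 2) 0 then 1 else 0)
termination_by hi - lo
decreasing_by all_goals omega

-- B: build seq = gateOutput :: gate outputs (comprehension = mapM; none = IndexError),
-- then divide-and-conquer count over [0, len(seq)).
def calculate_switches_alt (switchesNumber : Int) (vectorsNumber : Int) (workload : List (List Int)) (gateOutput : Int) : Int :=
  match (PySem.List.pyRange 0 vectorsNumber 1).mapM
      (fun i => (PySem.List.pyGet? workload i).bind pvOr4) with
  | some outs =>
      let seq := gateOutput :: outs
      switchesNumber + pvTransDC seq 0 seq.length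
  | none => 0  -- unreachable under Pre_ (Python raises IndexError)

-- ===== PRECONDITION & SPEC =====
-- Pre_ excludes exactly the inputs where both Pythons raise IndexError: an index
-- beyond workload, or a scanned row that is shorter than 4 and all zero (so the
-- short-circuiting `or` chain reads a missing element).
def Pre_calculate_switches (switchesNumber : Int) (vectorsNumber : Int) (workload : List (List Int)) (gateOutput : Int) : Prop :=
  vectorsNumber ≤ (workload.length : Int) ∧
    ∀ row ∈ workload.take vectorsNumber.toNat, 4 ≤ row.length ∨ ∃ x ∈ row, x ≠ 0
instance (switchesNumber : Int) (vectorsNumber : Int) (workload : List (List Int)) (gateOutput : Int) : Decidable (Pre_calculate_switches switchesNumber vectorsNumber workload gateOutput) := by unfold Pre_calculate_switches; infer_instance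

def pvWitness_calculate_switches : Int × Int × List (List Int) × Int := (2, 3, [[0,0,0,0],[1,0],[0,5,0]], 0)

def Spec_calculate_switches (switchesNumber : Int) (vectorsNumber : Int) (workload : List (List Int)) (gateOutput : Int) (out : Int) : Prop := out = calculate_switches_alt switchesNumber vectorsNumber workload gateOutput
instance (switchesNumber : Int) (vectorsNumber : Int) (workload : List (List Int)) (gateOutput : Int) (out : Int) : Decidable (Spec_calculate_switches switchesNumber vectorsNumber workload gateOutput out) := by unfold Spec_calculate_switches; infer_instance

-- ===== CLAIM (what is proved, stated in full; the proofs are below) =====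
def Claim_equal_calculate_switches : Prop := ∀ (switchesNumber : Int) (vectorsNumber : Int) (workload : List (List Int)) (gateOutput : Int), Dom_calculate_switches switchesNumber vectorsNumber workload gateOutput → Pre_calculate_switches switchesNumber vectorsNumber workload gateOutput → Spec_calculate_switches switchesNumber vectorsNumber workload gateOutput (calculate_switches switchesNumber vectorsNumber workload gateOutput)

-- ===== LEMMAS AND PROOFS =====

-- transitions of the sequence go :: outs, head-recursively (proof-side characterisation)
def pvTrans (go : Int) : List Int → Int
  | [] => 0
  | o :: rest => (if go ≠ o then 1 else 0) + pvTrans o rest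

theorem pvFold_none {α β : Type} (rows : List α) (h : α → β → Option β) :
    rows.foldl (fun (st : Option β) row => st.bind fun p => h row p) none = none := by
  induction rows with
  | nil => rfl
  | cons r rest ih => simpa using ih

-- core (A side): the fused fold computes sw + transitions of the produced output list
theorem pvFold_eq_trans (rows : List (List Int)) (sw go : Int) :
    (rows.foldl
      (fun (st : Option (Int × Int)) row =>
        st.bind fun p =>
          (pvOr4 row).map fun ng => if p.2 == ng then p else (p.1 + 1, ng))
      (some (sw, go))).map Prod.fst
    = (rows.mapM pvOr4).map (fun outs => sw + pvTrans go outs) := by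
  induction rows generalizing sw go with
  | nil => simp [pvTrans]
  | cons r rest ih =>
      cases hv : pvOr4 r with
      | none =>
          simp only [List.foldl_cons, List.mapM_cons, hv, Option.bind_some, Option.map_none,
            Option.map_none]
          rw [pvFold_none]
          rfl
      | some v =>
          by_cases hgo : go = v
          · have := ih sw v
            simp only [List.foldl_cons, List.mapM_cons, hv, Option.bind_some, Option.map_some,
              beq_iff_eq, hgo, if_true, Option.bind_some] at this ⊢
            rw [this]
            cases rest.mapM pvOr4 with
            | none => rfl
            | some outs => simp [pvTrans]
          · have := ih (sw + 1) v
            simp only [List.foldl_cons, List.mapM_cons, hv, Option.bind_some, Option.map_some,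
              beq_iff_eq, if_neg hgo] at this ⊢
            rw [this]
            cases rest.mapM pvOr4 with
            | none => rfl
            | some outs =>
                simp [pvTrans, hgo]
                ring

-- per-index transition indicator of seq
def pvInd (seq : List Int) (k : Nat) : Int :=
  if seq.getD (k - 1) 0 ≠ seq.getD k 0 then 1 else 0

-- B side: the divide-and-conquer count equals the sum of indicators over (lo, hi)
theorem pvTransDC_eq_sum (seq : List Int) (lo hi : Nat) :
    pvTransDC seq lo hi = ∑ k ∈ Finset.Ico (lo + 1) hi, pvInd seq k := by
  induction lo, hi using pvTransDC.induct with
  | case1 lo hi h =>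
      rw [pvTransDC]
      rw [if_pos h]
      have : Finset.Ico (lo + 1) hi = ∅ := by
        apply Finset.Ico_eq_empty; omega
      simp [this]
  | case2 lo hi h ih1 ih2 =>
      rw [pvTransDC, if_neg h, ih1, ih2]
      have h1 : lo + 1 ≤ (lo + hi) / 2 := by omega
      have h2 : (lo + hi) / 2 < hi := by omega
      rw [← Finset.sum_Ico_consecutive (pvInd seq) h1 (Nat.le_of_lt h2),
        Finset.sum_eq_sum_Ico_succ_bot h2 (pvInd seq)]
      unfold pvInd
      ring

-- shifting the sequence by one head shifts the indicator index by one
theorem pvInd_cons (a : Int) (seq : List Int) (k : Nat) (hk : 1 ≤ k) :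
    pvInd (a :: seq) (k + 1) = pvInd seq k := by
  obtain ⟨j, rfl⟩ : ∃ j, k = j + 1 := ⟨k - 1, by omega⟩
  simp [pvInd]

-- proof-side characterisation: pvTrans is the same indicator sum over the full range
theorem pvTrans_eq_sum (go : Int) (outs : List Int) :
    pvTrans go outs = ∑ k ∈ Finset.Ico 1 (outs.length + 1), pvInd (go :: outs) k := by
  induction outs generalizing go with
  | nil => simp [pvTrans]
  | cons o rest ih =>
      have hlt : 1 < rest.length + 1 + 1 := by omega
      simp only [List.length_cons]
      rw [Finset.sum_eq_sum_Ico_succ_bot hlt (pvInd (go :: o :: rest))]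
      have hshift : ∑ k ∈ Finset.Ico 2 (rest.length + 1 + 1), pvInd (go :: o :: rest) k
          = ∑ k ∈ Finset.Ico 1 (rest.length + 1), pvInd (o :: rest) k := by
        rw [Finset.sum_Ico_eq_sum_range, Finset.sum_Ico_eq_sum_range]
        apply Finset.sum_congr (by simp)
        intro i _
        have e : 2 + i = (1 + i) + 1 := by omega
        rw [e, pvInd_cons _ _ _ (by omega)]
      rw [hshift, ← ih o]
      show pvTrans go (o :: rest) = pvInd (go :: o :: rest) 1 + pvTrans o rest
      simp [pvTrans, pvInd]
  
-- the two counts agree on the full sequence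
theorem pvTransDC_eq_trans (go : Int) (outs : List Int) :
    pvTransDC (go :: outs) 0 (go :: outs).length = pvTrans go outs := by
  rw [pvTransDC_eq_sum, pvTrans_eq_sum]
  simp

-- indexing bridge: fold over range(n) with pyGet? = fold over (take n) rows
theorem pvFold_range (workload : List (List Int)) (m : Nat) (hm : m ≤ workload.length)
    {S : Type} (f : S → List Int → Option S) (init : Option S) :
    ((List.range m).map Int.ofNat).foldl
        (fun st i => st.bind fun s => (PySem.List.pyGet? workload i).bind (f s)) init
    = (workload.take m).foldl (fun st row => st.bind fun s => f s row) init := by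
  induction m generalizing init with
  | zero => simp
  | succ n ih =>
      have hn : n < workload.length := Nat.lt_of_lt_of_le (Nat.lt_succ_self n) hm
      rw [List.range_succ, List.map_append, List.foldl_append,
        ih (Nat.le_of_lt hn) init, List.take_add_one, List.getElem?_eq_getElem hn,
        List.foldl_append]
      cases (workload.take n).foldl (fun st row => st.bind fun s => f s row) init <;>
        simp [List.getElem?_eq_getElem hn]

-- same bridge for mapM (B's list comprehension)
theorem pvMapM_range (workload : List (List Int)) (m : Nat) (hm : m ≤ workload.length)
    (g : List Int → Option Int) :
    ((List.range m).map Int.ofNat).mapM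
        (fun i => (PySem.List.pyGet? workload i).bind g)
    = (workload.take m).mapM g := by
  induction m with
  | zero => simp
  | succ n ih =>
      have hn : n < workload.length := Nat.lt_of_lt_of_le (Nat.lt_succ_self n) hm
      rw [List.range_succ, List.map_append, List.mapM_append,
        ih (Nat.le_of_lt hn), List.take_add_one, List.getElem?_eq_getElem hn,
        List.mapM_append]
      cases (workload.take n).mapM g <;> cases hg : g workload[n] <;>
        simp [hg, List.getElem?_eq_getElem hn]

theorem pvRange_cast (n : Int) :
    PySem.List.pyRange 0 n 1 = (List.range n.toNat).map Int.ofNat := by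
  rw [PySem.List.pyRange_one]
  simp

-- ===== VERDICT (by name: the statement is the Claim_ definition above) =====
theorem calculate_switches_spec : Claim_equal_calculate_switches := by
  intro sw vn workload go _ hpre
  have hm : vn.toNat ≤ workload.length := by
    have := hpre.1
    omega
  unfold Spec_calculate_switches calculate_switches calculate_switches_alt
  rw [pvRange_cast,
    pvFold_range workload vn.toNat hm
      (fun (p : Int × Int) row => (pvOr4 row).map fun ng => if p.2 == ng then p else (p.1 + 1, ng))
      (some (sw, go)),
    pvMapM_range workload vn.toNat hm pvOr4]
  have hcore := pvFold_eq_trans (workload.take vn.toNat) sw go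
  cases hfold : (workload.take vn.toNat).foldl
      (fun (st : Option (Int × Int)) row =>
        st.bind fun p => (pvOr4 row).map fun ng => if p.2 == ng then p else (p.1 + 1, ng))
      (some (sw, go)) with
  | none =>
      rw [hfold] at hcore
      cases hmm : (workload.take vn.toNat).mapM pvOr4 with
      | none => rfl
      | some outs => rw [hmm] at hcore; simp at hcore
  | some p =>
      rw [hfold] at hcore
      cases hmm : (workload.take vn.toNat).mapM pvOr4 with
      | none => rw [hmm] at hcore; simp at hcore
      | some outs =>
          rw [hmm] at hcore
          simp only [Option.map_some, Option.some.injEq] at hcore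
          simp only [hcore]
          rw [pvTransDC_eq_trans go outs]
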